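-- pv_equiv track=rewrite | github.com/louisc-s/Extracellular-Action-Potential-Classification | Functions.py | MatchClassIndex
-- ===== SOURCE A (Python) =====
-- def MatchClassIndex(PredIndex, Index, Class):
--
--     combilists = zip(Index,Class) #combine provided index and class lists
--     sortedlists = sorted(combilists) #sort the lists in ascending order of location within data set
--     tuples = zip(*sortedlists) #create tuple from ordered list
--
--     ti, tc = [list(t) for t in tuples]
--
--     #create varibales to store matched spike indexes and classes
--     specific = []
--     solutions = []
--
--     #create "not found" variable to determine how
--     # many detected peaks have not been matched
--     nf = 0
--
--     #create list to determine wehther a given spike index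
--     #has already been matched to
--     alreadychosen = [(0)for i in tc]
--
--     #iterate through detected spike locations
--     for i in PredIndex:
--
--         #iterate through reference spkike locations
--         for g in range(0,len(ti)):
--             # check whether detected spike and reference spike are within
--             # a suitable distance of each other to be the same spike
--             if i - ti[g] <= 20:
--                 if alreadychosen[g] == 0: #check whether reference spike has been matched already
--                     #match detcted spike location with reference
--                     # class of matched reference spike location
--                     specific.append(i)
--                     specific.append(tc[g])
--                     solutions.append(specific)
--                     specific = []
--                     alreadychosen[g] = 1 #label this reference spike location as matched
--                     break
--         #check whether a detected spike has been matched with a ref. spike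
--         if g == len(ti)-1 and i != PredIndex[len(PredIndex)-1]:
--             nf = nf+1
--
--     #check how many reference spikes were not matched
--     unmacthed = len(ti)-sum(alreadychosen)
--     DetIndex = []
--     DetClass = []
--
--     # create new index and class lists with
--     #detcted spike locations and associated classes
--     for specific in solutions:
--         DetIndex.append(specific[0])
--         DetClass.append(specific[1])
--
--     return DetIndex, DetClass
-- ===== SOURCE B (Python) =====
-- def MatchClassIndex(PredIndex, Index, Class):
--     # sorted reference pairs; binary-search the first available slot with
--     # location >= i - 20 and remove it, instead of rescanning flagged slots
--     avail = sorted(zip(Index, Class))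
--     DetIndex = []
--     DetClass = []
--     for i in PredIndex:
--         lo, hi = 0, len(avail)
--         while lo < hi:
--             mid = (lo + hi) // 2
--             if avail[mid][0] < i - 20:
--                 lo = mid + 1
--             else:
--                 hi = mid
--         if lo < len(avail):
--             DetIndex.append(i)
--             DetClass.append(avail.pop(lo)[1])
--     return DetIndex, DetClass
-- ===== Notes on version B (the rewrite author's own statement) =====
-- stated objective: faster
-- what changed: Instead of rescanning all reference slots with an already-chosen flag array for every predicted spike, B keeps the sorted reference pairs as a shrinking availability list and binary-searches the first slot with location >= i-20, then pops it.
import Mathlib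
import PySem

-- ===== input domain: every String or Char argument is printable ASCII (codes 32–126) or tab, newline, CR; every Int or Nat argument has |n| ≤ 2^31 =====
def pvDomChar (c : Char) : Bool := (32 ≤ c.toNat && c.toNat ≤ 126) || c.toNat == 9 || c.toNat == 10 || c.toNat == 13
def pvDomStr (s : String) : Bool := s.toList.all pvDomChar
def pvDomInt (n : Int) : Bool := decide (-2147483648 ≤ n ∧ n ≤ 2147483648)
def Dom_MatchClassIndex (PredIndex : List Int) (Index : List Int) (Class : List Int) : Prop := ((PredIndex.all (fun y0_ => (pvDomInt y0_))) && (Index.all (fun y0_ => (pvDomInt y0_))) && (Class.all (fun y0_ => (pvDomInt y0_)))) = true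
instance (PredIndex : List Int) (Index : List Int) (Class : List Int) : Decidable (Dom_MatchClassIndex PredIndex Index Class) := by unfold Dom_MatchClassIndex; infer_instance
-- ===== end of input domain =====

-- B replaces A's per-spike rescan of a flag array by a binary search in a shrinking
-- sorted availability list (same return value; A's dead counters nf/unmatched are not ported).

-- ===== PORT A =====
-- inner 'for g in range(0, len(ti))' with break: first g with i - ti[g] <= 20 and alreadychosen[g] == 0
def pvFindG (i : Int) (ti ac : List Int) (g : Nat) : Option Nat :=
  if g < ti.length then
    if i - ti.getD g 0 ≤ 20 then
      if ac.getD g 0 = 0 then some g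
      else pvFindG i ti ac (g + 1)
    else pvFindG i ti ac (g + 1)
  else none
termination_by ti.length - g

def MatchClassIndex (PredIndex : List Int) (Index : List Int) (Class : List Int) : List Int × List Int :=
  -- sorted(zip(Index, Class)) : Python sorts the pairs lexicographically
  let sortedlists := PySem.List.sorted (Index.zip Class) (fun p => toLex p) false
  let ti := sortedlists.map Prod.fst
  let tc := sortedlists.map Prod.snd
  let alreadychosen := tc.map (fun _ => (0 : Int))
  -- solutions : list of matched (i, class) pairs; state = (solutions, alreadychosen)
  let st := PredIndex.foldl (fun (st : List (Int × Int) × List Int) i =>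
    match pvFindG i ti st.2 0 with
    | some g => (st.1 ++ [(i, tc.getD g 0)], st.2.set g 1)
    | none => st) ([], alreadychosen)
  (st.1.map Prod.fst, st.1.map Prod.snd)

-- ===== PORT B =====
-- hand-written bisect loop of Source B: while lo < hi: mid = (lo+hi)//2; …
def pvBsearch (avail : List (Int × Int)) (x : Int) (lo hi : Nat) : Nat :=
  if lo < hi then
    if (avail.getD ((lo + hi) / 2) (0, 0)).1 < x then pvBsearch avail x ((lo + hi) / 2 + 1) hi
    else pvBsearch avail x lo ((lo + hi) / 2)
  else lo
termination_by hi - lo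
decreasing_by all_goals omega

def MatchClassIndex_alt (PredIndex : List Int) (Index : List Int) (Class : List Int) : List Int × List Int :=
  let avail0 := PySem.List.sorted (Index.zip Class) (fun p => toLex p) false
  let st := PredIndex.foldl (fun (st : List Int × List Int × List (Int × Int)) i =>
    let lo := pvBsearch st.2.2 (i - 20) 0 st.2.2.length
    if lo < st.2.2.length then
      (st.1 ++ [i], st.2.1 ++ [(st.2.2.getD lo (0, 0)).2], st.2.2.eraseIdx lo)
    else st) ([], [], avail0)
  (st.1, st.2.1)

-- ===== PRECONDITION & SPEC =====
-- Pre_ excludes exactly the inputs where Python A raises: with Index or Class empty,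
-- 'ti, tc = [list(t) for t in tuples]' unpacks an empty zip (ValueError); B returns ([], []) there.
def Pre_MatchClassIndex (PredIndex : List Int) (Index : List Int) (Class : List Int) : Prop :=
  Index ≠ [] ∧ Class ≠ []
instance (PredIndex : List Int) (Index : List Int) (Class : List Int) : Decidable (Pre_MatchClassIndex PredIndex Index Class) := by unfold Pre_MatchClassIndex; infer_instance
def pvWitness_MatchClassIndex : List Int × List Int × List Int := ([25, 3], [10, 40], [1, 2])

def Spec_MatchClassIndex (PredIndex : List Int) (Index : List Int) (Class : List Int) (out : List Int × List Int) : Prop := out = MatchClassIndex_alt PredIndex Index Class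
instance (PredIndex : List Int) (Index : List Int) (Class : List Int) (out : List Int × List Int) : Decidable (Spec_MatchClassIndex PredIndex Index Class out) := by unfold Spec_MatchClassIndex; infer_instance

-- ===== CLAIM (what is proved, stated in full; the proofs are below) =====
def Claim_equal_MatchClassIndex : Prop := ∀ (PredIndex : List Int) (Index : List Int) (Class : List Int), Dom_MatchClassIndex PredIndex Index Class → Pre_MatchClassIndex PredIndex Index Class → Spec_MatchClassIndex PredIndex Index Class (MatchClassIndex PredIndex Index Class)
-- ===== LEMMAS AND PROOFS =====

-- the still-available reference pairs, in order, given A's flag list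
def pvFilt : List (Int × Int) → List Int → List (Int × Int)
  | p :: ps, a :: as => if a = 0 then p :: pvFilt ps as else pvFilt ps as
  | _, _ => []

-- structural version of A's inner scan
def pvFindS (i : Int) : List Int → List Int → Option Nat
  | t :: ts, a :: as =>
    if i - t ≤ 20 then
      if a = 0 then some 0 else (pvFindS i ts as).map (· + 1)
    else (pvFindS i ts as).map (· + 1)
  | _, _ => none

theorem pvFindG_eq_findS (i : Int) : ∀ (ti ac : List Int) (g : Nat), ac.length = ti.length →
    pvFindG i ti ac g = (pvFindS i (ti.drop g) (ac.drop g)).map (· + g) := by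
  intro ti ac g
  induction hn : ti.length - g using Nat.strong_induction_on generalizing g with
  | _ n ih =>
  intro hl
  rw [pvFindG]
  by_cases hg : g < ti.length
  · have hga : g < ac.length := by omega
    have hdt : ti.drop g = ti[g] :: ti.drop (g + 1) := List.drop_eq_getElem_cons hg
    have hda : ac.drop g = ac[g] :: ac.drop (g + 1) := List.drop_eq_getElem_cons hga
    have hgt : ti.getD g 0 = ti[g] := by simp [List.getD_eq_getElem?_getD, List.getElem?_eq_getElem hg]
    have hga' : ac.getD g 0 = ac[g] := by simp [List.getD_eq_getElem?_getD, List.getElem?_eq_getElem hga]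
    rw [hdt, hda, pvFindS, hgt, hga', if_pos hg]
    by_cases hc : i - ti[g] ≤ 20
    · by_cases hz : ac[g] = 0
      · simp [hc, hz]
      · have := ih (ti.length - (g + 1)) (by omega) (g + 1) rfl hl
        simp only [hc, hz, if_true, if_false, this, Option.map_map]
        congr 1; funext x; simp; omega
    · have := ih (ti.length - (g + 1)) (by omega) (g + 1) rfl hl
      simp only [hc, if_false, this, Option.map_map]
      congr 1; funext x; simp; omega
  · rw [if_neg hg]
    have hd : ti.drop g = [] := List.drop_eq_nil_of_le (by omega)
    rw [hd]
    cases ac.drop g <;> simp [pvFindS]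

theorem pvFilt_sublist : ∀ (ps : List (Int × Int)) (as_ : List Int), (pvFilt ps as_).Sublist ps := by
  intro ps
  induction ps with
  | nil => intro as_; cases as_ <;> simp [pvFilt]
  | cons p ps ih =>
    intro as_
    cases as_ with
    | nil => simp [pvFilt]
    | cons a as =>
      by_cases h : a = 0 <;> simp [pvFilt, h]
      · exact ih as
      · exact (ih as).cons p

theorem pvFilt_replicate : ∀ (ps : List (Int × Int)) (as_ : List Int),
    (∀ a ∈ as_, a = 0) → ps.length ≤ as_.length → pvFilt ps as_ = ps := by
  intro ps
  induction ps with
  | nil => intro as_ _ _; cases as_ <;> simp [pvFilt]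
  | cons p ps ih =>
    intro as_ hz hl
    cases as_ with
    | nil => simp at hl
    | cons a as =>
      have ha : a = 0 := hz a (by simp)
      simp [pvFilt, ha]
      exact ih as (fun b hb => hz b (by simp [hb])) (by simpa using hl)

-- the heart: one step of A's flag scan corresponds to dropWhile/takeWhile on the filtered list
theorem pvStep_corr (i : Int) : ∀ (ps : List (Int × Int)) (as_ : List Int), as_.length = ps.length →
    (match pvFindS i (ps.map Prod.fst) as_ with
     | none => (pvFilt ps as_).dropWhile (fun p => decide (p.1 < i - 20)) = []
     | some g => ∃ q rest, (pvFilt ps as_).dropWhile (fun p => decide (p.1 < i - 20)) = q :: rest ∧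
          (ps.map Prod.snd).getD g 0 = q.2 ∧
          pvFilt ps (as_.set g 1) = (pvFilt ps as_).takeWhile (fun p => decide (p.1 < i - 20)) ++ rest) := by
  intro ps
  induction ps with
  | nil => intro as_ _; simp [pvFindS, pvFilt]
  | cons p ps ih =>
    intro as_ hl
    cases as_ with
    | nil => simp at hl
    | cons a as =>
      have hl' : as.length = ps.length := by simpa using hl
      have IH := ih as hl'
      by_cases ha : a = 0
      · subst ha
        by_cases hc : i - p.1 ≤ 20
        · have hP : ¬ (p.1 < i - 20) := by omega
          simp only [List.map_cons, pvFindS, hc, if_true, pvFilt]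
          refine ⟨p, pvFilt ps as, ?_, ?_, ?_⟩
          · simp [hP]
          · simp
          · simp [List.set, pvFilt, hP]
        · have hP : p.1 < i - 20 := by omega
          simp only [List.map_cons, pvFindS, hc, if_false, pvFilt]
          cases hfs : pvFindS i (ps.map Prod.fst) as with
          | none =>
            rw [hfs] at IH
            simpa [hP] using IH
          | some g =>
            rw [hfs] at IH
            obtain ⟨q, rest, h1, h2, h3⟩ := IH
            refine ⟨q, rest, ?_, ?_, ?_⟩
            · simpa [hP] using h1
            · simpa using h2
            · simp [List.set, pvFilt, hP, h3]
      · by_cases hc : i - p.1 ≤ 20 <;>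
        · simp only [List.map_cons, pvFindS, hc, if_true, if_false, if_neg ha, pvFilt]
          cases hfs : pvFindS i (ps.map Prod.fst) as with
          | none => rw [hfs] at IH; simpa using IH
          | some g =>
            rw [hfs] at IH
            obtain ⟨q, rest, h1, h2, h3⟩ := IH
            exact ⟨q, rest, h1, by simpa using h2, by simpa [List.set, pvFilt, ha] using h3⟩

-- bisect bracket: bounds and the separation property, given fst-sortedness
theorem pvBsearch_bracket (avail : List (Int × Int)) (x : Int)
    (hs : avail.Pairwise (fun a b => a.1 ≤ b.1)) :
    ∀ lo hi, lo ≤ hi → hi ≤ avail.length →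
    (∀ j (h : j < avail.length), j < lo → avail[j].1 < x) →
    (∀ j (h : j < avail.length), hi ≤ j → x ≤ avail[j].1) →
    pvBsearch avail x lo hi ≤ avail.length ∧
    (∀ j (h : j < avail.length), j < pvBsearch avail x lo hi → avail[j].1 < x) ∧
    (∀ j (h : j < avail.length), pvBsearch avail x lo hi ≤ j → x ≤ avail[j].1) := by
  have mono : ∀ p q (hq : q < avail.length) (hpq : p ≤ q), (avail[p]'(by omega)).1 ≤ avail[q].1 := by
    intro p q hq hpq
    rcases Nat.lt_or_ge p q with h | h
    · exact List.pairwise_iff_getElem.mp hs p q (by omega) hq h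
    · have : p = q := by omega
      subst this; exact le_refl _
  intro lo hi
  induction hn : hi - lo using Nat.strong_induction_on generalizing lo hi with
  | _ n ih =>
  intro hlh hhl hbelow habove
  rw [pvBsearch]
  by_cases hlt : lo < hi
  · rw [if_pos hlt]
    have hmid : (lo + hi) / 2 < avail.length := by omega
    have hget : avail.getD ((lo + hi) / 2) (0, 0) = avail[(lo + hi) / 2] := by
      simp [List.getD_eq_getElem?_getD, List.getElem?_eq_getElem hmid]
    rw [hget]
    by_cases hc : (avail[(lo + hi) / 2]).1 < x
    · rw [if_pos hc]
      exact ih (hi - ((lo + hi) / 2 + 1)) (by omega) ((lo + hi) / 2 + 1) hi rfl (by omega) hhl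
        (fun j hj hjlt => lt_of_le_of_lt (mono j ((lo + hi) / 2) hmid (by omega)) hc)
        habove
    · rw [if_neg hc]
      exact ih ((lo + hi) / 2 - lo) (by omega) lo ((lo + hi) / 2) rfl (by omega) (by omega)
        hbelow
        (fun j hj hjge => le_trans (le_of_not_gt hc) (mono ((lo + hi) / 2) j hj hjge))
  · rw [if_neg hlt]
    exact ⟨by omega, fun j hj hjlt => hbelow j hj hjlt,
      fun j hj hjge => habove j hj (by omega)⟩

theorem pvBsearch_eq_takeWhile (avail : List (Int × Int)) (x : Int)
    (hs : avail.Pairwise (fun a b => a.1 ≤ b.1)) :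
    pvBsearch avail x 0 avail.length = (avail.takeWhile (fun p => decide (p.1 < x))).length := by
  obtain ⟨h1, h2, h3⟩ := pvBsearch_bracket avail x hs 0 avail.length (by omega) le_rfl
    (by omega) (by omega)
  set P : (Int × Int) → Bool := fun p => decide (p.1 < x) with hP
  have hle : (avail.takeWhile P).length ≤ avail.length := (List.takeWhile_prefix P).length_le
  set r := pvBsearch avail x 0 avail.length with hr
  by_contra hne
  rcases Nat.lt_or_ge (avail.takeWhile P).length r with h | h
  · have hjl : (avail.takeWhile P).length < avail.length := by omega
    have hdw : avail.dropWhile P ≠ [] := by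
      intro hnil
      have := List.takeWhile_append_dropWhile (p := P) (l := avail)
      rw [hnil, List.append_nil] at this
      have := congrArg List.length this
      omega
    have hhead : P ((avail.dropWhile P).head hdw) = false := List.head_dropWhile_not P hdw
    have heq : avail = avail.takeWhile P ++ avail.dropWhile P :=
      (List.takeWhile_append_dropWhile (p := P) (l := avail)).symm
    have hgetb : avail[(avail.takeWhile P).length] = (avail.dropWhile P).head hdw := by
      rw [List.getElem_of_eq heq hjl, List.getElem_append_right (by omega)]
      simp [List.head_eq_getElem]
    have := h2 _ hjl h
    rw [hgetb] at this
    simp only [hP, decide_eq_false_iff_not, not_lt] at hhead this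
    omega
  · rcases Nat.lt_or_ge r (avail.takeWhile P).length with h' | h'
    · have hrl : r < avail.length := by omega
      have hgeta : (avail.takeWhile P)[r]'h' = avail[r] := (List.takeWhile_prefix P).getElem h'
      have hmem : (avail.takeWhile P)[r]'h' ∈ avail.takeWhile P := List.getElem_mem h'
      have := List.mem_takeWhile_imp hmem
      rw [hgeta] at this
      simp [hP] at this
      have := h3 r hrl (by omega)
      omega
    · omega

theorem pvEraseIdx_append (l1 l2 : List (Int × Int)) (q : Int × Int) :
    (l1 ++ q :: l2).eraseIdx l1.length = l1 ++ l2 := by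
  induction l1 with
  | nil => simp
  | cons a t ih => simp [List.eraseIdx_cons_succ, ih]

theorem pvGetD_append (l1 l2 : List (Int × Int)) (q : Int × Int) :
    (l1 ++ q :: l2).getD l1.length (0, 0) = q := by
  simp [List.getD_eq_getElem?_getD]

-- both fold loops, run from related states, produce the same output
theorem pvLoop (pairs : List (Int × Int)) (hpw : pairs.Pairwise (fun a b => a.1 ≤ b.1)) :
    ∀ (P : List Int) (sol : List (Int × Int)) (ac di dc : List Int) (avail : List (Int × Int)),
    ac.length = pairs.length → avail = pvFilt pairs ac →
    di = sol.map Prod.fst → dc = sol.map Prod.snd →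
    (let stA := P.foldl (fun (st : List (Int × Int) × List Int) i =>
        match pvFindG i (pairs.map Prod.fst) st.2 0 with
        | some g => (st.1 ++ [(i, (pairs.map Prod.snd).getD g 0)], st.2.set g 1)
        | none => st) (sol, ac)
     let stB := P.foldl (fun (st : List Int × List Int × List (Int × Int)) i =>
        let lo := pvBsearch st.2.2 (i - 20) 0 st.2.2.length
        if lo < st.2.2.length then
          (st.1 ++ [i], st.2.1 ++ [(st.2.2.getD lo (0, 0)).2], st.2.2.eraseIdx lo)
        else st) (di, dc, avail)
     (stA.1.map Prod.fst, stA.1.map Prod.snd) = (stB.1, stB.2.1)) := by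
  intro P
  induction P with
  | nil =>
    intro sol ac di dc avail hlen hfil hdi hdc
    simp [hdi, hdc]
  | cons i P ih =>
    intro sol ac di dc avail hlen hfil hdi hdc
    simp only [List.foldl_cons]
    have hsub : avail.Sublist pairs := hfil ▸ pvFilt_sublist pairs ac
    have hsort : avail.Pairwise (fun a b => a.1 ≤ b.1) := hpw.sublist hsub
    have hfind : pvFindG i (pairs.map Prod.fst) ac 0 = pvFindS i (pairs.map Prod.fst) ac := by
      have := pvFindG_eq_findS i (pairs.map Prod.fst) ac 0 (by simp [hlen])
      simpa using this
    have hlo : pvBsearch avail (i - 20) 0 avail.length =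
        (avail.takeWhile (fun p => decide (p.1 < i - 20))).length :=
      pvBsearch_eq_takeWhile avail (i - 20) hsort
    have hcorr := pvStep_corr i pairs ac hlen
    cases hfs : pvFindS i (pairs.map Prod.fst) ac with
    | none =>
      rw [hfs] at hcorr
      -- dropWhile = [] so takeWhile = avail, lo = length, B's branch not taken
      have hdwe : avail.dropWhile (fun p => decide (p.1 < i - 20)) = [] := by
        rw [hfil]; exact hcorr
      have htw : avail.takeWhile (fun p => decide (p.1 < i - 20)) = avail := by
        have h := List.takeWhile_append_dropWhile (p := fun p => decide (p.1 < i - 20)) (l := avail)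
        rw [hdwe, List.append_nil] at h
        exact h
      have hloeq : pvBsearch avail (i - 20) 0 avail.length = avail.length := by
        rw [hlo, htw]
      rw [hfind, hfs]
      simp only [hloeq, lt_irrefl, if_false]
      exact ih sol ac di dc avail hlen hfil hdi hdc
    | some g =>
      rw [hfs] at hcorr
      obtain ⟨q, rest, h1, h2, h3⟩ := hcorr
      have hdwe : avail.dropWhile (fun p => decide (p.1 < i - 20)) = q :: rest := by
        rw [hfil]; exact h1
      have havail : avail = avail.takeWhile (fun p => decide (p.1 < i - 20)) ++ q :: rest :=
        calc avail = avail.takeWhile (fun p => decide (p.1 < i - 20)) ++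
              avail.dropWhile (fun p => decide (p.1 < i - 20)) :=
                (List.takeWhile_append_dropWhile).symm
          _ = avail.takeWhile (fun p => decide (p.1 < i - 20)) ++ q :: rest := by rw [hdwe]
      have hloeq : pvBsearch avail (i - 20) 0 avail.length =
          (avail.takeWhile (fun p => decide (p.1 < i - 20))).length := hlo
      have hlolt : (avail.takeWhile (fun p => decide (p.1 < i - 20))).length < avail.length := by
        have := congrArg List.length havail
        simp at this
        omega
      rw [hfind, hfs]
      simp only [hloeq, hlolt, if_true]
      have hget : (avail.getD (avail.takeWhile (fun p => decide (p.1 < i - 20))).length (0, 0)) = q := by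
        have h := pvGetD_append (avail.takeWhile (fun p => decide (p.1 < i - 20))) rest q
        rw [← havail] at h
        exact h
      have herase : avail.eraseIdx (avail.takeWhile (fun p => decide (p.1 < i - 20))).length =
          avail.takeWhile (fun p => decide (p.1 < i - 20)) ++ rest := by
        have h := pvEraseIdx_append (avail.takeWhile (fun p => decide (p.1 < i - 20))) rest q
        rw [← havail] at h
        exact h
      rw [hget, herase]
      refine ih (sol ++ [(i, (pairs.map Prod.snd).getD g 0)]) (ac.set g 1)
        (di ++ [i]) (dc ++ [q.2]) _ (by simp [hlen]) ?_ ?_ ?_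
      · rw [h3, hfil]
      · simp [hdi]
      · simp [hdc]
        simp [List.getD_eq_getElem?_getD, List.getElem?_map] at h2
        exact h2.symm

theorem pvSorted_fst_pairwise (xs : List (Int × Int)) :
    (PySem.List.sorted xs (fun p => toLex p) false).Pairwise (fun a b => a.1 ≤ b.1) := by
  have h := PySem.List.sorted_pairwise (xs := xs) (key := fun p : Int × Int => toLex p)
  exact h.imp (fun {a b} hab => by
    rcases Prod.Lex.toLex_le_toLex.mp hab with h | ⟨h1, h2⟩
    · exact le_of_lt h
    · exact le_of_eq h1)

-- ===== VERDICT (by name: the statement is the Claim_ definition above) =====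
theorem MatchClassIndex_spec : Claim_equal_MatchClassIndex := by
  intro PredIndex Index Class _ _
  unfold Spec_MatchClassIndex MatchClassIndex MatchClassIndex_alt
  set pairs := PySem.List.sorted (Index.zip Class) (fun p => toLex p) false with hpairs
  have hpw : pairs.Pairwise (fun a b => a.1 ≤ b.1) := pvSorted_fst_pairwise _
  have h := pvLoop pairs hpw PredIndex [] ((pairs.map Prod.snd).map (fun _ => (0 : Int)))
    [] [] pairs (by simp) ?_ rfl rfl
  · simpa using h
  · rw [pvFilt_replicate]
    · intro a ha
      obtain ⟨x, -, h⟩ := List.mem_map.mp ha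
      simpa using h.symm
    · simp
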